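-- pv_equiv track=rewrite | github.com/mattcarp/mc-home | voice/intent_parser/ha_context.py | build_entity_summary
-- ===== SOURCE A (Python) =====
-- from typing import Optional
--
-- SAMPLE_ENTITIES = {
--     "lights": [
--         {"entity_id": "light.living_room", "name": "Living Room Light", "area": "living_room"},
--         {"entity_id": "light.bedroom", "name": "Bedroom Light", "area": "bedroom"},
--         {"entity_id": "light.kitchen", "name": "Kitchen Light", "area": "kitchen"},
--         {"entity_id": "light.dining_room", "name": "Dining Room Light", "area": "dining_room"},
--         {"entity_id": "light.garden", "name": "Garden Light", "area": "outdoor"},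
--         {"entity_id": "light.hallway", "name": "Hallway Light", "area": "hallway"},
--     ],
--     "switches": [
--         {"entity_id": "switch.tv", "name": "TV", "area": "living_room"},
--         {"entity_id": "switch.air_conditioner", "name": "Air Conditioner", "area": "living_room"},
--         {"entity_id": "switch.kettle", "name": "Kettle", "area": "kitchen"},
--         {"entity_id": "switch.fan_bedroom", "name": "Bedroom Fan", "area": "bedroom"},
--     ],
--     "climate": [
--         {"entity_id": "climate.thermostat", "name": "Thermostat", "area": "living_room"},
--     ],
--     "covers": [
--         {"entity_id": "cover.living_room_shutters", "name": "Living Room Shutters", "area": "living_room"},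
--         {"entity_id": "cover.bedroom_shutters", "name": "Bedroom Shutters", "area": "bedroom"},
--     ],
--     "locks": [
--         {"entity_id": "lock.front_door", "name": "Front Door Lock", "area": "entrance"},
--     ],
--     "sensors": [
--         {"entity_id": "sensor.living_room_temperature", "name": "Living Room Temperature", "area": "living_room"},
--         {"entity_id": "sensor.living_room_humidity", "name": "Living Room Humidity", "area": "living_room"},
--         {"entity_id": "binary_sensor.front_door_contact", "name": "Front Door Sensor", "area": "entrance"},
--         {"entity_id": "binary_sensor.motion_living_room", "name": "Living Room Motion", "area": "living_room"},
--     ],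
--     "scenes": [
--         {"entity_id": "scene.dinner", "name": "Dinner", "description": "Dining lights on, kitchen bright, living room dimmed"},
--         {"entity_id": "scene.movie_night", "name": "Movie Night", "description": "Living room dimmed, TV on, shutters closed"},
--         {"entity_id": "scene.goodnight", "name": "Goodnight", "description": "All lights off, front door locked, bedroom light dim"},
--         {"entity_id": "scene.morning", "name": "Morning", "description": "Kitchen and living room lights on, shutters open"},
--         {"entity_id": "scene.leaving", "name": "Leaving", "description": "All lights off, all locks locked, shutters closed"},
--         {"entity_id": "scene.welcome_home", "name": "Welcome Home", "description": "Hallway and living room lights on"},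
--     ],
--     "media_players": [
--         {"entity_id": "media_player.living_room_speaker", "name": "Living Room Speaker", "area": "living_room"},
--         {"entity_id": "media_player.bedroom_speaker", "name": "Bedroom Speaker", "area": "bedroom"},
--     ],
-- }
--
-- def build_entity_summary(entities: Optional[dict] = None) -> str:
--     """
--     Render a compact, human-readable summary of available HA entities.
--     This goes into Claude's system prompt so it knows what exists.
--     """
--     if entities is None:
--         entities = SAMPLE_ENTITIES
--
--     lines = []
--
--     if entities.get("lights"):
--         lines.append("## Lights")
--         for e in entities["lights"]:
--             lines.append(f"  - {e['entity_id']} ({e['name']}, area: {e.get('area', 'unknown')})")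
--
--     if entities.get("switches"):
--         lines.append("## Switches / Plugs")
--         for e in entities["switches"]:
--             lines.append(f"  - {e['entity_id']} ({e['name']}, area: {e.get('area', 'unknown')})")
--
--     if entities.get("covers"):
--         lines.append("## Covers (Shutters / Blinds)")
--         for e in entities["covers"]:
--             lines.append(f"  - {e['entity_id']} ({e['name']}, area: {e.get('area', 'unknown')})")
--
--     if entities.get("climate"):
--         lines.append("## Climate")
--         for e in entities["climate"]:
--             lines.append(f"  - {e['entity_id']} ({e['name']})")
--
--     if entities.get("locks"):
--         lines.append("## Locks")
--         for e in entities["locks"]: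
--             lines.append(f"  - {e['entity_id']} ({e['name']})")
--
--     if entities.get("media_players"):
--         lines.append("## Media Players")
--         for e in entities["media_players"]:
--             lines.append(f"  - {e['entity_id']} ({e['name']}, area: {e.get('area', 'unknown')})")
--
--     if entities.get("sensors"):
--         lines.append("## Sensors (read-only)")
--         for e in entities["sensors"]:
--             lines.append(f"  - {e['entity_id']} ({e['name']})")
--
--     if entities.get("scenes"):
--         lines.append("## Scenes")
--         for s in entities["scenes"]:
--             desc = s.get("description", "")
--             lines.append(f"  - {s['entity_id']} ({s['name']}) — {desc}")
--
--     return "\n".join(lines)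
-- ===== SOURCE B (Python) =====
-- from typing import Optional
--
-- SAMPLE_ENTITIES = {
--     "lights": [
--         {"entity_id": "light.living_room", "name": "Living Room Light", "area": "living_room"},
--         {"entity_id": "light.bedroom", "name": "Bedroom Light", "area": "bedroom"},
--         {"entity_id": "light.kitchen", "name": "Kitchen Light", "area": "kitchen"},
--         {"entity_id": "light.dining_room", "name": "Dining Room Light", "area": "dining_room"},
--         {"entity_id": "light.garden", "name": "Garden Light", "area": "outdoor"},
--         {"entity_id": "light.hallway", "name": "Hallway Light", "area": "hallway"},
--     ],
--     "switches": [
--         {"entity_id": "switch.tv", "name": "TV", "area": "living_room"},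
--         {"entity_id": "switch.air_conditioner", "name": "Air Conditioner", "area": "living_room"},
--         {"entity_id": "switch.kettle", "name": "Kettle", "area": "kitchen"},
--         {"entity_id": "switch.fan_bedroom", "name": "Bedroom Fan", "area": "bedroom"},
--     ],
--     "climate": [
--         {"entity_id": "climate.thermostat", "name": "Thermostat", "area": "living_room"},
--     ],
--     "covers": [
--         {"entity_id": "cover.living_room_shutters", "name": "Living Room Shutters", "area": "living_room"},
--         {"entity_id": "cover.bedroom_shutters", "name": "Bedroom Shutters", "area": "bedroom"},
--     ],
--     "locks": [
--         {"entity_id": "lock.front_door", "name": "Front Door Lock", "area": "entrance"},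
--     ],
--     "sensors": [
--         {"entity_id": "sensor.living_room_temperature", "name": "Living Room Temperature", "area": "living_room"},
--         {"entity_id": "sensor.living_room_humidity", "name": "Living Room Humidity", "area": "living_room"},
--         {"entity_id": "binary_sensor.front_door_contact", "name": "Front Door Sensor", "area": "entrance"},
--         {"entity_id": "binary_sensor.motion_living_room", "name": "Living Room Motion", "area": "living_room"},
--     ],
--     "scenes": [
--         {"entity_id": "scene.dinner", "name": "Dinner", "description": "Dining lights on, kitchen bright, living room dimmed"},
--         {"entity_id": "scene.movie_night", "name": "Movie Night", "description": "Living room dimmed, TV on, shutters closed"},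
--         {"entity_id": "scene.goodnight", "name": "Goodnight", "description": "All lights off, front door locked, bedroom light dim"},
--         {"entity_id": "scene.morning", "name": "Morning", "description": "Kitchen and living room lights on, shutters open"},
--         {"entity_id": "scene.leaving", "name": "Leaving", "description": "All lights off, all locks locked, shutters closed"},
--         {"entity_id": "scene.welcome_home", "name": "Welcome Home", "description": "Hallway and living room lights on"},
--     ],
--     "media_players": [
--         {"entity_id": "media_player.living_room_speaker", "name": "Living Room Speaker", "area": "living_room"},
--         {"entity_id": "media_player.bedroom_speaker", "name": "Bedroom Speaker", "area": "bedroom"},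
--     ],
-- }
--
-- # canonical output order and per-category header + line style
-- _CATS = {
--     "lights": ("## Lights", "area"),
--     "switches": ("## Switches / Plugs", "area"),
--     "covers": ("## Covers (Shutters / Blinds)", "area"),
--     "climate": ("## Climate", "plain"),
--     "locks": ("## Locks", "plain"),
--     "media_players": ("## Media Players", "area"),
--     "sensors": ("## Sensors (read-only)", "plain"),
--     "scenes": ("## Scenes", "scene"),
-- }
--
--
-- def _line(kind, e):
--     if kind == "area":
--         return f"  - {e['entity_id']} ({e['name']}, area: {e.get('area', 'unknown')})"
--     if kind == "plain":
--         return f"  - {e['entity_id']} ({e['name']})"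
--     return f"  - {e['entity_id']} ({e['name']}) — {e.get('description', '')}"
--
--
-- def build_entity_summary(entities: Optional[dict] = None) -> str:
--     """One pass over the input's items renders a block per known category;
--     the blocks are then emitted in the canonical category order."""
--     if entities is None:
--         entities = SAMPLE_ENTITIES
--     blocks = {}
--     for key, items in entities.items():
--         spec = _CATS.get(key)
--         if spec and items:
--             header, kind = spec
--             blocks[key] = "\n".join([header] + [_line(kind, e) for e in items])
--     return "\n".join(blocks[k] for k in _CATS if k in blocks)
-- ===== Notes on version B (the rewrite author's own statement) =====
-- stated objective: alternative
-- what changed: Instead of eight hard-coded sequential section blocks each probing entities.get(key), B makes one pass over the input's (key, items) pairs, rendering a block string per known category into a dict, and then emits the stored blocks in the canonical category order.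
-- outside the precondition, e.g. on build_entity_summary({'lights': [{'name': 'X'}]}): A raises KeyError, B raises KeyError
import Mathlib
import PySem

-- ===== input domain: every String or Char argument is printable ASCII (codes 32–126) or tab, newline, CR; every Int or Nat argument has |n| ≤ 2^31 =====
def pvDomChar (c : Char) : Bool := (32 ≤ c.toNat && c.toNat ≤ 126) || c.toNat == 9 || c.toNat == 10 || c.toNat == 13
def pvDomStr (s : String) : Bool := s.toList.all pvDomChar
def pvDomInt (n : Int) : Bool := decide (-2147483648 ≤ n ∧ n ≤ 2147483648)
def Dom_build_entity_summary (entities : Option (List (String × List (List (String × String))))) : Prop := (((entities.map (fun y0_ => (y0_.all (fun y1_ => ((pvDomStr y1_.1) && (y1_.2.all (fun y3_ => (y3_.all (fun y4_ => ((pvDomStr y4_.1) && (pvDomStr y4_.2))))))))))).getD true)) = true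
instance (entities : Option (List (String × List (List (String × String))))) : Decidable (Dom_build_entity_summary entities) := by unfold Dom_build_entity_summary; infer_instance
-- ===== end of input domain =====

-- B replaces A's eight hard-coded sequential sections by a single pass over the input's
-- (key, items) pairs that renders a block string per known category into a dict, followed by
-- an ordered emission of those blocks; objective: alternative decomposition, same output.

-- shared data constant (module-level SAMPLE_ENTITIES)
def SAMPLE_ENTITIES : List (String × List (List (String × String))) := [
  ("lights", [[("entity_id", "light.living_room"), ("name", "Living Room Light"), ("area", "living_room")], [("entity_id", "light.bedroom"), ("name", "Bedroom Light"), ("area", "bedroom")], [("entity_id", "light.kitchen"), ("name", "Kitchen Light"), ("area", "kitchen")], [("entity_id", "light.dining_room"), ("name", "Dining Room Light"), ("area", "dining_room")], [("entity_id", "light.garden"), ("name", "Garden Light"), ("area", "outdoor")], [("entity_id", "light.hallway"), ("name", "Hallway Light"), ("area", "hallway")]]),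
  ("switches", [[("entity_id", "switch.tv"), ("name", "TV"), ("area", "living_room")], [("entity_id", "switch.air_conditioner"), ("name", "Air Conditioner"), ("area", "living_room")], [("entity_id", "switch.kettle"), ("name", "Kettle"), ("area", "kitchen")], [("entity_id", "switch.fan_bedroom"), ("name", "Bedroom Fan"), ("area", "bedroom")]]),
  ("climate", [[("entity_id", "climate.thermostat"), ("name", "Thermostat"), ("area", "living_room")]]),
  ("covers", [[("entity_id", "cover.living_room_shutters"), ("name", "Living Room Shutters"), ("area", "living_room")], [("entity_id", "cover.bedroom_shutters"), ("name", "Bedroom Shutters"), ("area", "bedroom")]]),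
  ("locks", [[("entity_id", "lock.front_door"), ("name", "Front Door Lock"), ("area", "entrance")]]),
  ("sensors", [[("entity_id", "sensor.living_room_temperature"), ("name", "Living Room Temperature"), ("area", "living_room")], [("entity_id", "sensor.living_room_humidity"), ("name", "Living Room Humidity"), ("area", "living_room")], [("entity_id", "binary_sensor.front_door_contact"), ("name", "Front Door Sensor"), ("area", "entrance")], [("entity_id", "binary_sensor.motion_living_room"), ("name", "Living Room Motion"), ("area", "living_room")]]),
  ("scenes", [[("entity_id", "scene.dinner"), ("name", "Dinner"), ("description", "Dining lights on, kitchen bright, living room dimmed")], [("entity_id", "scene.movie_night"), ("name", "Movie Night"), ("description", "Living room dimmed, TV on, shutters closed")], [("entity_id", "scene.goodnight"), ("name", "Goodnight"), ("description", "All lights off, front door locked, bedroom light dim")], [("entity_id", "scene.morning"), ("name", "Morning"), ("description", "Kitchen and living room lights on, shutters open")], [("entity_id", "scene.leaving"), ("name", "Leaving"), ("description", "All lights off, all locks locked, shutters closed")], [("entity_id", "scene.welcome_home"), ("name", "Welcome Home"), ("description", "Hallway and living room lights on")]]),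
  ("media_players", [[("entity_id", "media_player.living_room_speaker"), ("name", "Living Room Speaker"), ("area", "living_room")], [("entity_id", "media_player.bedroom_speaker"), ("name", "Bedroom Speaker"), ("area", "bedroom")]])]

-- ===== PORT A =====
-- e['k'] raises KeyError when the key is missing; Pre_ excludes that, so the total
-- form Dict.getD … "" is exact on every admitted input (same in PORT B).
def build_entity_summary (entities : Option (List (String × List (List (String × String))))) : String :=
  let d := PySem.Dict.ofList (entities.getD SAMPLE_ENTITIES)
  let lines : List String := []
  let items := (d.get? "lights").getD []
  let lines := if items.isEmpty then lines else
    items.foldl (fun acc e => acc ++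
      ["  - " ++ PySem.Dict.getD (PySem.Dict.ofList e) "entity_id" "" ++ " (" ++
        PySem.Dict.getD (PySem.Dict.ofList e) "name" "" ++ ", area: " ++
        PySem.Dict.getD (PySem.Dict.ofList e) "area" "unknown" ++ ")"])
      (lines ++ ["## Lights"])
  let items := (d.get? "switches").getD []
  let lines := if items.isEmpty then lines else
    items.foldl (fun acc e => acc ++
      ["  - " ++ PySem.Dict.getD (PySem.Dict.ofList e) "entity_id" "" ++ " (" ++
        PySem.Dict.getD (PySem.Dict.ofList e) "name" "" ++ ", area: " ++
        PySem.Dict.getD (PySem.Dict.ofList e) "area" "unknown" ++ ")"])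
      (lines ++ ["## Switches / Plugs"])
  let items := (d.get? "covers").getD []
  let lines := if items.isEmpty then lines else
    items.foldl (fun acc e => acc ++
      ["  - " ++ PySem.Dict.getD (PySem.Dict.ofList e) "entity_id" "" ++ " (" ++
        PySem.Dict.getD (PySem.Dict.ofList e) "name" "" ++ ", area: " ++
        PySem.Dict.getD (PySem.Dict.ofList e) "area" "unknown" ++ ")"])
      (lines ++ ["## Covers (Shutters / Blinds)"])
  let items := (d.get? "climate").getD []
  let lines := if items.isEmpty then lines else
    items.foldl (fun acc e => acc ++
      ["  - " ++ PySem.Dict.getD (PySem.Dict.ofList e) "entity_id" "" ++ " (" ++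
        PySem.Dict.getD (PySem.Dict.ofList e) "name" "" ++ ")"])
      (lines ++ ["## Climate"])
  let items := (d.get? "locks").getD []
  let lines := if items.isEmpty then lines else
    items.foldl (fun acc e => acc ++
      ["  - " ++ PySem.Dict.getD (PySem.Dict.ofList e) "entity_id" "" ++ " (" ++
        PySem.Dict.getD (PySem.Dict.ofList e) "name" "" ++ ")"])
      (lines ++ ["## Locks"])
  let items := (d.get? "media_players").getD []
  let lines := if items.isEmpty then lines else
    items.foldl (fun acc e => acc ++
      ["  - " ++ PySem.Dict.getD (PySem.Dict.ofList e) "entity_id" "" ++ " (" ++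
        PySem.Dict.getD (PySem.Dict.ofList e) "name" "" ++ ", area: " ++
        PySem.Dict.getD (PySem.Dict.ofList e) "area" "unknown" ++ ")"])
      (lines ++ ["## Media Players"])
  let items := (d.get? "sensors").getD []
  let lines := if items.isEmpty then lines else
    items.foldl (fun acc e => acc ++
      ["  - " ++ PySem.Dict.getD (PySem.Dict.ofList e) "entity_id" "" ++ " (" ++
        PySem.Dict.getD (PySem.Dict.ofList e) "name" "" ++ ")"])
      (lines ++ ["## Sensors (read-only)"])
  let items := (d.get? "scenes").getD []
  let lines := if items.isEmpty then lines else
    items.foldl (fun acc s => acc ++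
      ["  - " ++ PySem.Dict.getD (PySem.Dict.ofList s) "entity_id" "" ++ " (" ++
        PySem.Dict.getD (PySem.Dict.ofList s) "name" "" ++ ") — " ++
        PySem.Dict.getD (PySem.Dict.ofList s) "description" ""])
      (lines ++ ["## Scenes"])
  PySem.Str.join "\n" lines

-- ===== PORT B =====
-- _CATS: canonical category order with header and line style per category
def pvCats : PySem.Dict String (String × String) := PySem.Dict.ofList [
  ("lights", ("## Lights", "area")),
  ("switches", ("## Switches / Plugs", "area")),
  ("covers", ("## Covers (Shutters / Blinds)", "area")),
  ("climate", ("## Climate", "plain")),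
  ("locks", ("## Locks", "plain")),
  ("media_players", ("## Media Players", "area")),
  ("sensors", ("## Sensors (read-only)", "plain")),
  ("scenes", ("## Scenes", "scene"))]

def pvLine (kind : String) (e : List (String × String)) : String :=
  if kind == "area" then
    "  - " ++ PySem.Dict.getD (PySem.Dict.ofList e) "entity_id" "" ++ " (" ++
      PySem.Dict.getD (PySem.Dict.ofList e) "name" "" ++ ", area: " ++
      PySem.Dict.getD (PySem.Dict.ofList e) "area" "unknown" ++ ")"
  else if kind == "plain" then
    "  - " ++ PySem.Dict.getD (PySem.Dict.ofList e) "entity_id" "" ++ " (" ++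
      PySem.Dict.getD (PySem.Dict.ofList e) "name" "" ++ ")"
  else
    "  - " ++ PySem.Dict.getD (PySem.Dict.ofList e) "entity_id" "" ++ " (" ++
      PySem.Dict.getD (PySem.Dict.ofList e) "name" "" ++ ") — " ++
      PySem.Dict.getD (PySem.Dict.ofList e) "description" ""

-- 'for k in _CATS' iterates _CATS' insertion order
def pvOrder : List String := ["lights", "switches", "covers", "climate", "locks", "media_players", "sensors", "scenes"]

def build_entity_summary_alt (entities : Option (List (String × List (List (String × String))))) : String :=
  let l := entities.getD SAMPLE_ENTITIES
  let blocks := l.foldl (fun (b : PySem.Dict String String) p =>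
    match pvCats.get? p.1 with
    | none => b
    | some spec => if p.2.isEmpty then b
        else b.insert p.1 (PySem.Str.join "\n" (spec.1 :: p.2.map (pvLine spec.2)))) PySem.Dict.empty
  PySem.Str.join "\n" (pvOrder.filterMap (fun k => blocks.get? k))

-- ===== PRECONDITION & SPEC =====
-- Pre_ excludes (a) association lists with duplicate category keys, which a Python dict cannot
-- represent, and (b) inputs where an entity in one of the eight rendered categories lacks
-- "entity_id" or "name", on which Python A raises KeyError.
def Pre_build_entity_summary (entities : Option (List (String × List (List (String × String))))) : Prop :=
  ((entities.getD []).map Prod.fst).Nodup ∧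
  ∀ p ∈ entities.getD [], p.1 ∈ (["lights", "switches", "covers", "climate", "locks", "media_players", "sensors", "scenes"] : List String) →
    ∀ e ∈ p.2, (PySem.Dict.contains (PySem.Dict.ofList e) "entity_id") = true ∧
               (PySem.Dict.contains (PySem.Dict.ofList e) "name") = true
instance (entities : Option (List (String × List (List (String × String))))) : Decidable (Pre_build_entity_summary entities) := by unfold Pre_build_entity_summary; infer_instance

def pvWitness_build_entity_summary : (Option (List (String × List (List (String × String))))) :=
  some [("lights", [[("entity_id", "light.x"), ("name", "X")]]), ("locks", [])]

def Spec_build_entity_summary (entities : Option (List (String × List (List (String × String))))) (out : String) : Prop := out = build_entity_summary_alt entities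
instance (entities : Option (List (String × List (List (String × String))))) (out : String) : Decidable (Spec_build_entity_summary entities out) := by unfold Spec_build_entity_summary; infer_instance

-- ===== CLAIM (what is proved, stated in full; the proofs are below) =====
def Claim_equal_build_entity_summary : Prop := ∀ (entities : Option (List (String × List (List (String × String))))), Dom_build_entity_summary entities → Pre_build_entity_summary entities → Spec_build_entity_summary entities (build_entity_summary entities)

-- ===== LEMMAS AND PROOFS =====

-- B's loop body, named for the proofs (syntactically the fold function of the port)
def pvStep (b : PySem.Dict String String) (p : String × List (List (String × String))) : PySem.Dict String String :=
  match pvCats.get? p.1 with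
  | none => b
  | some spec => if p.2.isEmpty then b
      else b.insert p.1 (PySem.Str.join "\n" (spec.1 :: p.2.map (pvLine spec.2)))

-- the lines of the section for key k, as A produces them, phrased through pvCats/pvLine
def pvSec (d : PySem.Dict String (List (List (String × String)))) (k : String) : List String :=
  match pvCats.get? k with
  | none => []
  | some spec =>
    let I := (d.get? k).getD []
    if I.isEmpty then [] else spec.1 :: I.map (pvLine spec.2)

theorem pv_blocks_get (l : List (String × List (List (String × String)))) (k : String)
    (h : (l.map Prod.fst).Nodup) (b : PySem.Dict String String) :
    (l.foldl pvStep b).get? k =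
      match l.find? (fun p => p.1 == k) with
      | none => b.get? k
      | some p =>
        match pvCats.get? k with
        | none => b.get? k
        | some spec => if p.2.isEmpty then b.get? k
            else some (PySem.Str.join "\n" (spec.1 :: p.2.map (pvLine spec.2))) := by
  induction l generalizing b with
  | nil => simp
  | cons q rest ih =>
    simp only [List.map_cons, List.nodup_cons] at h
    by_cases hk : q.1 = k
    · have hfind : (q :: rest).find? (fun p => p.1 == k) = some q := by
        simp [List.find?, hk]
      have hnone : rest.find? (fun p => p.1 == k) = none := by
        rw [List.find?_eq_none]
        intro p hp
        simp only [beq_iff_eq]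
        intro hpk
        exact h.1 (by rw [hk, ← hpk]; exact List.mem_map_of_mem hp)
      rw [List.foldl_cons, ih h.2, hnone, hfind]
      subst hk
      unfold pvStep
      cases hc : pvCats.get? q.1 with
      | none => simp
      | some spec =>
        by_cases he : q.2.isEmpty
        · simp [he]
        · simp [he, PySem.Dict.get?_insert_self]
    · have hqk : (q.1 == k) = false := by simp [hk]
      have hfind : (q :: rest).find? (fun p => p.1 == k) = rest.find? (fun p => p.1 == k) := by
        simp [List.find?, hqk]
      have hb : (pvStep b q).get? k = b.get? k := by
        unfold pvStep
        cases pvCats.get? q.1 with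
        | none => rfl
        | some spec =>
          by_cases he : q.2.isEmpty
          · simp [he]
          · simp [he, PySem.Dict.get?_insert_of_ne _ _ (Ne.symm hk)]
      rw [List.foldl_cons, ih h.2, hfind, hb]

theorem pv_ofList_get (l : List (String × List (List (String × String)))) (k : String)
    (h : (l.map Prod.fst).Nodup) :
    (PySem.Dict.ofList l).get? k = (l.find? (fun p => p.1 == k)).map Prod.snd := by
  have hitems : (PySem.Dict.ofList l).items = l := by
    have := PySem.Dict.items_foldl_insert_fresh (l := l) (k := Prod.fst) (v := Prod.snd)
      (d := PySem.Dict.empty) (by simp [PySem.Dict.contains_empty]) (by simpa using h)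
    simpa [PySem.Dict.ofList, PySem.Dict.update] using this
  simp [PySem.Dict.get?, hitems]

theorem pv_blocks_sec (l : List (String × List (List (String × String)))) (k : String)
    (h : (l.map Prod.fst).Nodup) :
    (l.foldl pvStep PySem.Dict.empty).get? k =
      if (pvSec (PySem.Dict.ofList l) k).isEmpty then none
      else some (PySem.Str.join "\n" (pvSec (PySem.Dict.ofList l) k)) := by
  rw [pv_blocks_get l k h]
  unfold pvSec
  rw [pv_ofList_get l k h]
  cases hf : l.find? (fun p => p.1 == k) with
  | none =>
    cases pvCats.get? k with
    | none => simp [PySem.Dict.get?_empty]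
    | some spec => simp [PySem.Dict.get?_empty]
  | some p =>
    cases pvCats.get? k with
    | none => simp [PySem.Dict.get?_empty]
    | some spec =>
      by_cases he : p.2.isEmpty
      · simp [he, PySem.Dict.get?_empty]
      · simp [he]

theorem pv_chars_join_append (nl : List Char) :
    ∀ (s t : List (List Char)), s ≠ [] →
    PySem.Chars.join nl (s ++ t) =
      if t.isEmpty then PySem.Chars.join nl s
      else PySem.Chars.join nl s ++ nl ++ PySem.Chars.join nl t
  | [], _, hs => absurd rfl hs
  | [a], t, _ => by
    cases t with
    | nil => simp [PySem.Chars.join_singleton]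
    | cons b t' => simp [PySem.Chars.join_cons_cons, PySem.Chars.join_singleton]
  | a :: b :: s', t, _ => by
    have ih := pv_chars_join_append nl (b :: s') t (by simp)
    have h1 : PySem.Chars.join nl ((a :: b :: s') ++ t) = a ++ nl ++ PySem.Chars.join nl ((b :: s') ++ t) := by
      simp [PySem.Chars.join_cons_cons]
    rw [h1, ih]
    by_cases ht : t.isEmpty
    · simp [ht, PySem.Chars.join_cons_cons]
    · simp [ht, PySem.Chars.join_cons_cons, List.append_assoc]

theorem pv_fm_nil (nl : List Char) (rest : List (List (List Char))) :
    (rest.filterMap (fun t => if t.isEmpty then none else some (PySem.Chars.join nl t))).isEmpty = rest.flatten.isEmpty := by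
  induction rest with
  | nil => rfl
  | cons s r ih =>
    rw [List.filterMap_cons]
    by_cases hs : s.isEmpty
    · have hs' : s = [] := by simpa using hs
      rw [if_pos hs, ih, List.flatten_cons, hs', List.nil_append]
    · rw [if_neg hs, List.flatten_cons]
      have hs' : s ≠ [] := by simpa using hs
      simp [hs']

theorem pv_chars_join_filterMap (nl : List Char) :
    ∀ (secs : List (List (List Char))),
    PySem.Chars.join nl (secs.filterMap (fun t => if t.isEmpty then none else some (PySem.Chars.join nl t))) =
      PySem.Chars.join nl secs.flatten := by
  intro secs
  induction secs with
  | nil => rfl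
  | cons s rest ih =>
    rw [List.filterMap_cons, List.flatten_cons]
    by_cases hs : s.isEmpty
    · have hs' : s = [] := by simpa using hs
      rw [if_pos hs, hs', List.nil_append]; exact ih
    · rw [if_neg hs]
      change PySem.Chars.join nl ([PySem.Chars.join nl s] ++ rest.filterMap (fun t => if t.isEmpty then none else some (PySem.Chars.join nl t))) = _
      rw [pv_chars_join_append nl _ _ (by simp),
        pv_chars_join_append nl s rest.flatten (by simpa using hs),
        pv_fm_nil nl rest]
      by_cases hf : rest.flatten.isEmpty
      · rw [if_pos hf, if_pos hf, PySem.Chars.join_singleton]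
      · rw [if_neg hf, if_neg hf, PySem.Chars.join_singleton, ih]

theorem pv_str_join_filterMap (secs : List (List String)) :
    PySem.Str.join "\n" (secs.filterMap (fun t => if t.isEmpty then none else some (PySem.Str.join "\n" t))) =
      PySem.Str.join "\n" secs.flatten := by
  apply String.ext
  show (PySem.Str.join "\n" _).toList = (PySem.Str.join "\n" _).toList
  rw [PySem.Str.toList_join, PySem.Str.toList_join]
  have hmap : (secs.filterMap (fun t => if t.isEmpty then none else some (PySem.Str.join "\n" t))).map String.toList =
      (secs.map (List.map String.toList)).filterMap (fun t => if t.isEmpty then none else some (PySem.Chars.join "\n".toList t)) := by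
    induction secs with
    | nil => rfl
    | cons s rest ih =>
      rw [List.map_cons, List.filterMap_cons, List.filterMap_cons]
      by_cases hs : s.isEmpty
      · have h2 : (s.map String.toList).isEmpty = true := by
          cases s <;> simp_all
        rw [if_pos hs, if_pos h2, ih]
      · have h2 : (s.map String.toList).isEmpty = false := by
          cases s <;> simp_all
        rw [if_neg hs, if_neg (by simp [h2]), List.map_cons, ih, PySem.Str.toList_join]
  rw [hmap, pv_chars_join_filterMap, List.map_flatten]

theorem pv_sec_step {α : Type} (lines : List String) (hdr : String) (f : α → String) (items : List α) :
  (if items.isEmpty then lines else items.foldl (fun acc e => acc ++ [f e]) (lines ++ [hdr])) = lines ++ (if items.isEmpty then [] else hdr :: items.map f) := by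
  by_cases h : items.isEmpty
  · simp [h]
  · simp only [h, Bool.false_eq_true, if_false, PySem.List.foldl_append_singleton_eq_map,
      List.append_assoc, List.singleton_append]

theorem pvLine_area : pvLine "area" = (fun e => "  - " ++ PySem.Dict.getD (PySem.Dict.ofList e) "entity_id" "" ++ " (" ++
    PySem.Dict.getD (PySem.Dict.ofList e) "name" "" ++ ", area: " ++
    PySem.Dict.getD (PySem.Dict.ofList e) "area" "unknown" ++ ")") := rfl

theorem pvLine_plain : pvLine "plain" = (fun e => "  - " ++ PySem.Dict.getD (PySem.Dict.ofList e) "entity_id" "" ++ " (" ++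
    PySem.Dict.getD (PySem.Dict.ofList e) "name" "" ++ ")") := rfl

theorem pvLine_scene : pvLine "scene" = (fun s => "  - " ++ PySem.Dict.getD (PySem.Dict.ofList s) "entity_id" "" ++ " (" ++
    PySem.Dict.getD (PySem.Dict.ofList s) "name" "" ++ ") — " ++
    PySem.Dict.getD (PySem.Dict.ofList s) "description" "") := rfl

theorem pv_core (l : List (String × List (List (String × String))))
    (h : (l.map Prod.fst).Nodup) :
    build_entity_summary (some l) = build_entity_summary_alt (some l) := by
  have hB : build_entity_summary_alt (some l) =
      PySem.Str.join "\n" (pvOrder.filterMap (fun k => (l.foldl pvStep PySem.Dict.empty).get? k)) := rfl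
  have hcomp : (fun k => if (pvSec (PySem.Dict.ofList l) k).isEmpty then none
        else some (PySem.Str.join "\n" (pvSec (PySem.Dict.ofList l) k))) =
      ((fun t => if t.isEmpty then none else some (PySem.Str.join "\n" t)) ∘ (pvSec (PySem.Dict.ofList l))) := rfl
  rw [hB, List.filterMap_congr (fun k _ => pv_blocks_sec l k h), hcomp,
    ← List.filterMap_map, pv_str_join_filterMap]
  have hc1 : pvCats.get? "lights" = some ("## Lights", "area") := rfl
  have hc2 : pvCats.get? "switches" = some ("## Switches / Plugs", "area") := rfl
  have hc3 : pvCats.get? "covers" = some ("## Covers (Shutters / Blinds)", "area") := rfl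
  have hc4 : pvCats.get? "climate" = some ("## Climate", "plain") := rfl
  have hc5 : pvCats.get? "locks" = some ("## Locks", "plain") := rfl
  have hc6 : pvCats.get? "media_players" = some ("## Media Players", "area") := rfl
  have hc7 : pvCats.get? "sensors" = some ("## Sensors (read-only)", "plain") := rfl
  have hc8 : pvCats.get? "scenes" = some ("## Scenes", "scene") := rfl
  unfold build_entity_summary
  simp only [Option.getD_some]
  simp only [pv_sec_step]
  simp only [pvOrder, List.map_cons, List.map_nil, List.flatten_cons, List.flatten_nil,
    pvSec, hc1, hc2, hc3, hc4, hc5, hc6, hc7, hc8,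
    pvLine_area, pvLine_plain, pvLine_scene, List.nil_append, List.append_nil, List.append_assoc]

-- ===== VERDICT (by name: the statement is the Claim_ definition above) =====
theorem build_entity_summary_spec : Claim_equal_build_entity_summary := by
  intro entities _ hpre
  unfold Spec_build_entity_summary
  cases entities with
  | none =>
      show build_entity_summary (some SAMPLE_ENTITIES) = build_entity_summary_alt (some SAMPLE_ENTITIES)
      exact pv_core SAMPLE_ENTITIES (by decide)
  | some l =>
      exact pv_core l hpre.1
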